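-- pv_equiv track=rewrite | github.com/akaabdullahmateen/roadmap | mechatronics/computer-programming/tasks/tasks.py | lab30_task3_calcAssets1
-- ===== SOURCE A (Python) =====
-- def lab30_task3_calcAssets1(products,stock,/):
--     dry_fruits = zip(products.items(),stock.items())
--     assets = 0
--     for (product_name,unit_price),(stock_name,available_stock) in dry_fruits:
--         if product_name == stock_name:
--             assets += (unit_price * available_stock)
--         else:
--             raise IndexError("different product and stock names")
--     return assets
-- ===== SOURCE B (Python) =====
-- def lab30_task3_calcAssets1(products, stock, /):
--     # Divide and conquer over the paired entries: recursively split the index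
--     # range in half; a leaf validates its one pair (raising on mismatch) and
--     # yields its product, inner nodes add the two half-sums.
--     pairs = list(zip(products.items(), stock.items()))
--
--     def go(lo, hi):
--         if hi - lo == 0:
--             return 0
--         if hi - lo == 1:
--             (product_name, unit_price), (stock_name, available_stock) = pairs[lo]
--             if product_name != stock_name:
--                 raise IndexError("different product and stock names")
--             return unit_price * available_stock
--         mid = (lo + hi) // 2
--         return go(lo, mid) + go(mid, hi)
--
--     return go(0, len(pairs))
-- ===== Notes on version B (the rewrite author's own statement) =====
-- stated objective: alternative
-- what changed: B replaces A's linear accumulating loop by a divide-and-conquer recursion over the paired entries: the index range is split in half, leaves validate one key pair and yield one product, inner nodes add the two half-sums (addition re-associated, no running accumulator, no per-element loop).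
import Mathlib
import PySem

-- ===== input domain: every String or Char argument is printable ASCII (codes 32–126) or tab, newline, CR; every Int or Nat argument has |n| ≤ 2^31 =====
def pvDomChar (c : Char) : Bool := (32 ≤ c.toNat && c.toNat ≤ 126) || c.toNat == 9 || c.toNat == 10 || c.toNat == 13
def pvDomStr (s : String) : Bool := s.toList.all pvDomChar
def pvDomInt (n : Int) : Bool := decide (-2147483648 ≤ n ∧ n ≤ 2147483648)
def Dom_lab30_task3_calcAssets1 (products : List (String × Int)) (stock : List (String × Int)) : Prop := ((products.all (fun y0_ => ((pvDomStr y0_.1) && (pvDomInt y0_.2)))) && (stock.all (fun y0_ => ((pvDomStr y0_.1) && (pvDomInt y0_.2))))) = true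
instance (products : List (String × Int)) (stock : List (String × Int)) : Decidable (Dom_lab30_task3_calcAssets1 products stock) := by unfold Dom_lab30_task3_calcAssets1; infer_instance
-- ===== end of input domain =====

-- B replaces A's linear accumulating loop by a divide-and-conquer recursion over the paired entries (objective: alternative decomposition; equivalence proved on inputs where every positional key pair matches — elsewhere A raises IndexError).


-- ===== PORT A =====
-- A's loop over zip(products.items(), stock.items()): accumulate, or raise on a key mismatch
-- (none = IndexError; outside Pre_ the port yields 0 via getD, nothing is claimed there).
def pvLoopA : List ((String × Int) × (String × Int)) → Int → Option Int
  | [], assets => some assets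
  | ((product_name, unit_price), (stock_name, available_stock)) :: rest, assets =>
    if product_name == stock_name then pvLoopA rest (assets + unit_price * available_stock)
    else none

def lab30_task3_calcAssets1 (products : List (String × Int)) (stock : List (String × Int)) : Int :=
  (pvLoopA (products.zip stock) 0).getD 0

-- ===== PORT B =====
-- Source B's go(lo, hi): divide and conquer on the index range; none = the IndexError raise
-- (a leaf's pairs[lo] is always in range at the call sites, lo < hi ≤ pairs.length).
def pvGoB (pairs : List ((String × Int) × (String × Int))) (lo hi : Nat) : Option Int :=
  if hi - lo = 0 then some 0
  else if hi - lo = 1 then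
    match pairs[lo]? with
    | some ((product_name, unit_price), (stock_name, available_stock)) =>
      if product_name == stock_name then some (unit_price * available_stock) else none
    | none => none
  else  -- mid = (lo + hi) // 2, inlined
    match pvGoB pairs lo ((lo + hi) / 2), pvGoB pairs ((lo + hi) / 2) hi with
    | some a, some b => some (a + b)
    | _, _ => none
  termination_by hi - lo
  decreasing_by all_goals omega

def lab30_task3_calcAssets1_alt (products : List (String × Int)) (stock : List (String × Int)) : Int :=
  (pvGoB (products.zip stock) 0 (products.zip stock).length).getD 0

-- ===== PRECONDITION & SPEC =====
-- Pre_ excludes exactly the inputs where some positional key pair differs: there A raises IndexError.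
def Pre_lab30_task3_calcAssets1 (products : List (String × Int)) (stock : List (String × Int)) : Prop :=
  ∀ p ∈ products.zip stock, p.1.1 = p.2.1
instance (products : List (String × Int)) (stock : List (String × Int)) : Decidable (Pre_lab30_task3_calcAssets1 products stock) := by unfold Pre_lab30_task3_calcAssets1; infer_instance

def pvWitness_lab30_task3_calcAssets1 : (List (String × Int)) × (List (String × Int)) :=
  ([("fig", 3), ("date", 5)], [("fig", 7), ("date", 2), ("nut", 1)])

def Spec_lab30_task3_calcAssets1 (products : List (String × Int)) (stock : List (String × Int)) (out : Int) : Prop := out = lab30_task3_calcAssets1_alt products stock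
instance (products : List (String × Int)) (stock : List (String × Int)) (out : Int) : Decidable (Spec_lab30_task3_calcAssets1 products stock out) := by unfold Spec_lab30_task3_calcAssets1; infer_instance

-- ===== CLAIM (what is proved, stated in full; the proofs are below) =====
def Claim_equal_lab30_task3_calcAssets1 : Prop := ∀ (products : List (String × Int)) (stock : List (String × Int)), Dom_lab30_task3_calcAssets1 products stock → Pre_lab30_task3_calcAssets1 products stock → Spec_lab30_task3_calcAssets1 products stock (lab30_task3_calcAssets1 products stock)

-- ===== LEMMAS AND PROOFS =====

-- the value contributed by index i
def pvTerm (pairs : List ((String × Int) × (String × Int))) (i : Nat) : Int :=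
  (pairs.getD i (("", 0), ("", 0))).1.2 * (pairs.getD i (("", 0), ("", 0))).2.2

-- A's loop, on a fully matching zip, returns the accumulator plus the indexed sum.
theorem pvLoopA_matched (zs : List ((String × Int) × (String × Int)))
    (h : ∀ p ∈ zs, p.1.1 = p.2.1) (acc : Int) :
    pvLoopA zs acc = some (acc + ∑ i ∈ Finset.range zs.length, pvTerm zs i) := by
  induction zs generalizing acc with
  | nil => simp [pvLoopA]
  | cons z rest ih =>
    obtain ⟨⟨pn, up⟩, ⟨sn, av⟩⟩ := z
    have hz : pn = sn := h _ (List.mem_cons_self ..)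
    simp only [pvLoopA, hz, beq_self_eq_true, if_true]
    rw [ih (fun p hp => h p (List.mem_cons_of_mem _ hp))]
    rw [List.length_cons, Finset.sum_range_succ']
    simp [pvTerm]
    ring

-- B's recursion, on a fully matching range, returns the indexed sum over [lo, hi).
theorem pvGoB_matched (pairs : List ((String × Int) × (String × Int)))
    (h : ∀ p ∈ pairs, p.1.1 = p.2.1) :
    ∀ (n lo hi : Nat), hi - lo ≤ n → lo ≤ hi → hi ≤ pairs.length →
      pvGoB pairs lo hi = some (∑ i ∈ Finset.Ico lo hi, pvTerm pairs i) := by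
  intro n
  induction n with
  | zero =>
    intro lo hi hn hle hhi
    have : lo = hi := by omega
    subst this
    rw [pvGoB.eq_def]
    simp
  | succ n ih =>
    intro lo hi hn hle hhi
    rw [pvGoB.eq_def]
    by_cases h0 : hi - lo = 0
    · have : lo = hi := by omega
      subst this
      simp
    · rw [if_neg h0]
      by_cases h1 : hi - lo = 1
      · have hhi' : hi = lo + 1 := by omega
        subst hhi'
        have hlt : lo < pairs.length := by omega
        have hget : pairs[lo]? = some pairs[lo] := List.getElem?_eq_getElem hlt
        have hm : pairs[lo].1.1 = pairs[lo].2.1 := h _ (List.getElem_mem hlt)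
        have hb : (pairs[lo].1.1 == pairs[lo].2.1) = true := beq_iff_eq.mpr hm
        rcases hx : pairs[lo] with ⟨⟨pn, up⟩, sn, av⟩
        rw [hx] at hget hb
        rw [if_pos h1, hget]
        simp only [Finset.sum_Ico_eq_sum_range, Nat.add_sub_cancel_left, Finset.range_one,
          Finset.sum_singleton, Nat.add_zero]
        simp only at hb
        simp [hb, pvTerm, hget]
      · rw [if_neg h1]
        have hmid : lo ≤ (lo + hi) / 2 ∧ (lo + hi) / 2 ≤ hi := by omega
        rw [ih lo ((lo + hi) / 2) (by omega) hmid.1 (by omega),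
          ih ((lo + hi) / 2) hi (by omega) hmid.2 hhi]
        simp only
        rw [← Finset.sum_Ico_consecutive _ hmid.1 hmid.2]

-- the two indexed sums coincide (range n = Ico 0 n)
theorem sum_range_eq_Ico (pairs : List ((String × Int) × (String × Int))) :
    ∑ i ∈ Finset.range pairs.length, pvTerm pairs i
      = ∑ i ∈ Finset.Ico 0 pairs.length, pvTerm pairs i := by
  rw [Finset.range_eq_Ico]

-- ===== VERDICT (by name: the statement is the Claim_ definition above) =====
theorem lab30_task3_calcAssets1_spec : Claim_equal_lab30_task3_calcAssets1 := by
  intro products stock _hdom hpre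
  show _ = _
  unfold lab30_task3_calcAssets1 lab30_task3_calcAssets1_alt
  rw [pvLoopA_matched _ hpre,
    pvGoB_matched _ hpre ((products.zip stock).length) 0 _ (by omega) (Nat.zero_le _) le_rfl,
    sum_range_eq_Ico]
  simp
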